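-- pv_equiv track=rewrite | github.com/yxd97/hbm_ubmark | utils/syscfg_utils.py | genetare_sp_tags_grp_all2all
-- ===== SOURCE A (Python) =====
-- from typing import List,Tuple
--
-- def genetare_sp_tags_grp_all2all(ntg:int, nch:int, nch_per_grp:int) -> List[str]:
--     if nch_per_grp not in [4, 8]:
--         raise ValueError(f'Unsupported connectivity of {nch_per_grp} channels per group.')
--     if nch % nch_per_grp != 0:
--         raise ValueError(f'The number of channels must be a multiple of {nch_per_grp} (num of channels per groups) for group connectivity.')
--     ngroups = nch // nch_per_grp
--     if ntg % ngroups != 0: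
--         raise ValueError(f'The number of TGs must be a multiple of {ngroups} (num of groups) for group connectivity.')
--     ntgs_per_grp = ntg // ngroups
--     sp = []
--     for i in range(ntg):
--         grp_id = i // ntgs_per_grp
--         ch_lo = grp_id * nch_per_grp
--         ch_hi = ch_lo + nch_per_grp - 1
--         sp.append(f'sp=tg{i}.maxi:HBM[{ch_lo}:{ch_hi}]\n')
--     return sp
-- ===== SOURCE B (Python) =====
-- def genetare_sp_tags_grp_all2all(ntg: int, nch: int, nch_per_grp: int):
--     if nch_per_grp not in [4, 8]:
--         raise ValueError(f'Unsupported connectivity of {nch_per_grp} channels per group.')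
--     if nch % nch_per_grp != 0:
--         raise ValueError(f'The number of channels must be a multiple of {nch_per_grp} (num of channels per groups) for group connectivity.')
--     ngroups = nch // nch_per_grp
--     if ntg % ngroups != 0:
--         raise ValueError(f'The number of TGs must be a multiple of {ngroups} (num of groups) for group connectivity.')
--     ntgs_per_grp = ntg // ngroups
--     # stage 1: the channel-window suffix of every TG, by list repetition per group
--     suffixes = []
--     for grp_id in range(ngroups):
--         ch_lo = grp_id * nch_per_grp
--         suffixes += [f'.maxi:HBM[{ch_lo}:{ch_lo + nch_per_grp - 1}]\n'] * ntgs_per_grp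
--     # stage 2: prefix each suffix with its TG id
--     return [f'sp=tg{i}' + suf for i, suf in enumerate(suffixes)]
-- ===== Notes on version B (the rewrite author's own statement) =====
-- stated objective: alternative
-- what changed: Instead of one flat loop over range(ntg) that recovers each tag's group by an integer division, B works in two staged passes: it first builds the per-TG channel-window suffixes by list repetition ([suffix] * ntgs_per_grp appended per group), then prefixes each suffix with its TG id via enumerate; no division per element.
-- intended difference: When nch is negative but passes the divisibility checks (so ngroups < 0) and ntg > 0, A returns ntg tags addressing nonexistent negative channel indices such as HBM[-4:-1]; B returns [] since there are no channel groups to assign, which is the intended reading of a non-positive group count. — e.g. on genetare_sp_tags_grp_all2all(4, -4, 4): A returns ["sp=tg0.maxi:HBM[0:3]\n", "sp=tg1.maxi:HBM[-4:-1]\n", "sp=tg2.maxi:HBM[-4:-1]\n", "sp=tg3.maxi:HBM[-4:-1]\n"], B returns []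
import Mathlib
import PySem

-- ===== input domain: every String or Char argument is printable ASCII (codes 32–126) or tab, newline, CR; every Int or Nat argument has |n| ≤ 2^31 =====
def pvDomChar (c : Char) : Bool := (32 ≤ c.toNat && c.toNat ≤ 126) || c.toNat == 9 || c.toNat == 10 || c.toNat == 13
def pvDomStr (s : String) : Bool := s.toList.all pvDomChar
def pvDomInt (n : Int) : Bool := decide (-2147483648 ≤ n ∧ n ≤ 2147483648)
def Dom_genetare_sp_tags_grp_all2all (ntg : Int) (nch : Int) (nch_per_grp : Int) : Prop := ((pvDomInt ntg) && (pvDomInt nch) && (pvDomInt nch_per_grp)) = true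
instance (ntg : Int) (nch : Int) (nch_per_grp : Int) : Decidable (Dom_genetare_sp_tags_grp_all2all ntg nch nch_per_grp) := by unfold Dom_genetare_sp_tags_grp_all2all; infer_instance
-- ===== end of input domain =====

-- B replaces A's flat loop (group recovered by a per-element integer division) with two
-- staged passes: per-group list repetition of the channel-window suffix, then an
-- enumerate pass prefixing the TG ids; equivalence is about the return value.

-- ===== PORT A =====
def genetare_sp_tags_grp_all2all (ntg : Int) (nch : Int) (nch_per_grp : Int) : List String :=
  -- the three ValueError / ZeroDivisionError branches are excluded by Pre_
  let ngroups := PySem.Int.floordiv nch nch_per_grp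
  let ntgs_per_grp := PySem.Int.floordiv ntg ngroups
  (PySem.List.pyRange 0 ntg 1).foldl
    (fun sp i =>
      let grp_id := PySem.Int.floordiv i ntgs_per_grp
      let ch_lo := grp_id * nch_per_grp
      let ch_hi := ch_lo + nch_per_grp - 1
      sp ++ ["sp=tg" ++ PySem.Int.toStr i ++ ".maxi:HBM[" ++ PySem.Int.toStr ch_lo
             ++ ":" ++ PySem.Int.toStr ch_hi ++ "]\n"]) []

-- ===== PORT B =====
def genetare_sp_tags_grp_all2all_alt (ntg : Int) (nch : Int) (nch_per_grp : Int) : List String :=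
  let ngroups := PySem.Int.floordiv nch nch_per_grp
  let ntgs_per_grp := PySem.Int.floordiv ntg ngroups
  -- stage 1: the channel-window suffix of every TG, by list repetition per group
  let suffixes := (PySem.List.pyRange 0 ngroups 1).foldl
    (fun suffixes grp_id =>
      let ch_lo := grp_id * nch_per_grp
      suffixes ++ PySem.List.pyRepeat
        [".maxi:HBM[" ++ PySem.Int.toStr ch_lo ++ ":"
         ++ PySem.Int.toStr (ch_lo + nch_per_grp - 1) ++ "]\n"] ntgs_per_grp) []
  -- stage 2: prefix each suffix with its TG id
  (PySem.List.enumerate suffixes).map (fun p => "sp=tg" ++ PySem.Int.toStr p.1 ++ p.2)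

-- ===== PRECONDITION & SPEC =====
-- Pre_ = exactly the inputs where A returns: the two divisibility checks pass,
-- and ngroups ≠ 0 (else 'ntg % ngroups' raises ZeroDivisionError).
def Pre_genetare_sp_tags_grp_all2all (ntg : Int) (nch : Int) (nch_per_grp : Int) : Prop :=
  (nch_per_grp = 4 ∨ nch_per_grp = 8) ∧
  PySem.Int.mod nch nch_per_grp = 0 ∧
  PySem.Int.floordiv nch nch_per_grp ≠ 0 ∧
  PySem.Int.mod ntg (PySem.Int.floordiv nch nch_per_grp) = 0
instance (ntg : Int) (nch : Int) (nch_per_grp : Int) : Decidable (Pre_genetare_sp_tags_grp_all2all ntg nch nch_per_grp) := by unfold Pre_genetare_sp_tags_grp_all2all; infer_instance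
def pvWitness_genetare_sp_tags_grp_all2all : Int × Int × Int := (8, 16, 4)

-- When nch is negative but passes the divisibility checks (so ngroups < 0) and ntg > 0,
-- A returns ntg tags addressing nonexistent negative channel indices such as HBM[-4:-1];
-- B returns [] since there are no channel groups, the intended reading of that corner.
def D_genetare_sp_tags_grp_all2all (ntg : Int) (nch : Int) (nch_per_grp : Int) : Prop :=
  nch ≤ -1 ∧ 1 ≤ ntg
instance (ntg : Int) (nch : Int) (nch_per_grp : Int) : Decidable (D_genetare_sp_tags_grp_all2all ntg nch nch_per_grp) := by unfold D_genetare_sp_tags_grp_all2all; infer_instance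

def Spec_genetare_sp_tags_grp_all2all (ntg : Int) (nch : Int) (nch_per_grp : Int) (out : List String) : Prop := ¬ D_genetare_sp_tags_grp_all2all ntg nch nch_per_grp → out = genetare_sp_tags_grp_all2all_alt ntg nch nch_per_grp
instance (ntg : Int) (nch : Int) (nch_per_grp : Int) (out : List String) : Decidable (Spec_genetare_sp_tags_grp_all2all ntg nch nch_per_grp out) := by unfold Spec_genetare_sp_tags_grp_all2all; infer_instance

def pvDiffWitness_genetare_sp_tags_grp_all2all : Int × Int × Int := (4, -4, 4)
def pvDiffWitnessOut_genetare_sp_tags_grp_all2all : (List String) × (List String) :=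
  (["sp=tg0.maxi:HBM[0:3]\n", "sp=tg1.maxi:HBM[-4:-1]\n", "sp=tg2.maxi:HBM[-4:-1]\n", "sp=tg3.maxi:HBM[-4:-1]\n"], [])

-- ===== CLAIM (what is proved, stated in full; the proofs are below) =====
def Claim_unchanged_genetare_sp_tags_grp_all2all : Prop := ∀ (ntg : Int) (nch : Int) (nch_per_grp : Int), Dom_genetare_sp_tags_grp_all2all ntg nch nch_per_grp → Pre_genetare_sp_tags_grp_all2all ntg nch nch_per_grp → Spec_genetare_sp_tags_grp_all2all ntg nch nch_per_grp (genetare_sp_tags_grp_all2all ntg nch nch_per_grp)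
def Claim_changed_genetare_sp_tags_grp_all2all : Prop := Dom_genetare_sp_tags_grp_all2all (pvDiffWitness_genetare_sp_tags_grp_all2all.1) (pvDiffWitness_genetare_sp_tags_grp_all2all.2.1) (pvDiffWitness_genetare_sp_tags_grp_all2all.2.2) ∧ Pre_genetare_sp_tags_grp_all2all (pvDiffWitness_genetare_sp_tags_grp_all2all.1) (pvDiffWitness_genetare_sp_tags_grp_all2all.2.1) (pvDiffWitness_genetare_sp_tags_grp_all2all.2.2) ∧ D_genetare_sp_tags_grp_all2all (pvDiffWitness_genetare_sp_tags_grp_all2all.1) (pvDiffWitness_genetare_sp_tags_grp_all2all.2.1) (pvDiffWitness_genetare_sp_tags_grp_all2all.2.2) ∧ genetare_sp_tags_grp_all2all (pvDiffWitness_genetare_sp_tags_grp_all2all.1) (pvDiffWitness_genetare_sp_tags_grp_all2all.2.1) (pvDiffWitness_genetare_sp_tags_grp_all2all.2.2) = pvDiffWitnessOut_genetare_sp_tags_grp_all2all.1 ∧ genetare_sp_tags_grp_all2all_alt (pvDiffWitness_genetare_sp_tags_grp_all2all.1) (pvDiffWitness_genetare_sp_tags_grp_all2all.2.1) (pvDiffWitness_genetare_sp_tags_grp_all2all.2.2)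 = pvDiffWitnessOut_genetare_sp_tags_grp_all2all.2 ∧ pvDiffWitnessOut_genetare_sp_tags_grp_all2all.1 ≠ pvDiffWitnessOut_genetare_sp_tags_grp_all2all.2
def Claim_exact_genetare_sp_tags_grp_all2all : Prop := ∀ (ntg : Int) (nch : Int) (nch_per_grp : Int), Dom_genetare_sp_tags_grp_all2all ntg nch nch_per_grp → Pre_genetare_sp_tags_grp_all2all ntg nch nch_per_grp → D_genetare_sp_tags_grp_all2all ntg nch nch_per_grp → genetare_sp_tags_grp_all2all ntg nch nch_per_grp ≠ genetare_sp_tags_grp_all2all_alt ntg nch nch_per_grp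

-- ===== LEMMAS AND PROOFS =====

-- the suffix string B repeats for group q (abbreviation for the proofs only)
def pvSuf (npg q : Int) : String :=
  ".maxi:HBM[" ++ PySem.Int.toStr (q * npg) ++ ":" ++ PySem.Int.toStr (q * npg + npg - 1) ++ "]\n"

-- range(g*t) as g blocks of t consecutive integers
lemma pvRangeMulSplit {α : Type} (F : Int → α) (t : Int) (ht : 0 ≤ t) (n : Nat) :
    (PySem.List.pyRange 0 ((n : Int) * t) 1).map F
      = (PySem.List.pyRange 0 (n : Int) 1).flatMap
          (fun q => (PySem.List.pyRange 0 t 1).map (fun j => F (q * t + j))) := by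
  induction n with
  | zero => simp [PySem.List.pyRange_one_eq_nil]
  | succ n ih =>
    have h1 : ((n : Int) + 1) * t = (n : Int) * t + t := by ring
    have h2 : PySem.List.pyRange 0 (((n : Int) + 1) * t) 1
        = PySem.List.pyRange 0 ((n : Int) * t) 1 ++ PySem.List.pyRange ((n : Int) * t) ((n : Int) * t + t) 1 := by
      rw [h1]
      exact PySem.List.pyRange_one_append 0 ((n : Int) * t) ((n : Int) * t + t)
        (by positivity) (by omega)
    have h3 : PySem.List.pyRange 0 ((n : Int) + 1) 1
        = PySem.List.pyRange 0 (n : Int) 1 ++ [(n : Int)] :=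
      PySem.List.pyRange_one_succ_right (by positivity)
    push_cast
    rw [h2, h3, List.map_append, List.flatMap_append, ih]
    simp [PySem.List.pyRange_one, List.map_map, Function.comp]

theorem genetare_sp_tags_grp_all2all_spec : Claim_unchanged_genetare_sp_tags_grp_all2all := by
  intro ntg nch npg _hdom hpre hnd
  obtain ⟨hpg, hmod, hg, hmt⟩ := hpre
  simp only [genetare_sp_tags_grp_all2all, genetare_sp_tags_grp_all2all_alt]
  set g := PySem.Int.floordiv nch npg with hgdef
  set t := PySem.Int.floordiv ntg g with htdef
  have hpg' : 0 < npg := by rcases hpg with h | h <;> omega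
  have hntg_eq : t * g = ntg := by
    have := PySem.Int.floordiv_mul_add_mod ntg g
    rw [← htdef, hmt] at this; omega
  by_cases hntg : ntg ≤ 0
  · -- range(ntg) empty; B's suffix list is empty too (empty outer range, or t ≤ 0)
    rw [PySem.List.pyRange_one_eq_nil hntg]
    by_cases hgpos : 0 < g
    · have hts : t ≤ 0 := by nlinarith
      have : PySem.List.pyRepeat ([""] : List String) t = [] := by
        rw [PySem.List.pyRepeat_singleton]
        simp [Int.toNat_of_nonpos hts]
      simp [PySem.List.pyRepeat_singleton, Int.toNat_of_nonpos hts]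
    · rw [show PySem.List.pyRange 0 g 1 = [] from PySem.List.pyRange_one_eq_nil (by omega)]
      simp
  · -- ntg > 0; ¬D_ forces 0 ≤ nch, hence g > 0 and t > 0
    have hntg' : 0 < ntg := by omega
    have hnch : 0 ≤ nch := by
      unfold D_genetare_sp_tags_grp_all2all at hnd
      by_contra h; exact hnd ⟨by omega, by omega⟩
    have hg0 : 0 ≤ g := by
      rw [hgdef, PySem.Int.floordiv_eq_ediv_of_pos hpg']
      exact Int.ediv_nonneg hnch (by omega)
    have hgpos : 0 < g := by omega
    have htpos : 0 < t := by nlinarith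
    -- stage 1 of B: suffixes = range(ntg) mapped through i ↦ pvSuf npg (i // t)
    have hsuffixes :
        (PySem.List.pyRange 0 g 1).foldl
          (fun suffixes grp_id => suffixes ++ PySem.List.pyRepeat [pvSuf npg grp_id] t) []
        = (PySem.List.pyRange 0 ntg 1).map (fun i => pvSuf npg (PySem.Int.floordiv i t)) := by
      rw [PySem.List.foldl_append_eq_flatMap, List.nil_append]
      have hrep : ∀ q : Int, PySem.List.pyRepeat [pvSuf npg q] t
          = (PySem.List.pyRange 0 t 1).map (fun _ => pvSuf npg q) := by
        intro q
        rw [PySem.List.pyRepeat_singleton, List.map_const', PySem.List.length_pyRange_one]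
        norm_num
      have hsplit := pvRangeMulSplit
        (fun i => pvSuf npg (PySem.Int.floordiv i t)) t (by omega) g.toNat
      rw [Int.toNat_of_nonneg hg0] at hsplit
      have hgt : (g : Int) * t = ntg := by linarith [hntg_eq, mul_comm g t]
      rw [hgt] at hsplit
      rw [hsplit]
      apply List.flatMap_congr
      intro q hq
      rw [hrep q]
      apply List.map_congr_left
      intro j hj
      have hqb := (PySem.List.mem_pyRange_one).mp hq
      have hjb := (PySem.List.mem_pyRange_one).mp hj
      have hdiv : PySem.Int.floordiv (q * t + j) t = q :=
        (PySem.Int.floordiv_eq_iff_of_pos htpos).mpr ⟨by nlinarith, by nlinarith⟩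
      rw [hdiv]
    simp only [pvSuf] at hsuffixes
    rw [hsuffixes]
    -- stage 2 of B: enumerate of that map pairs each index with its own suffix
    rw [PySem.List.foldl_append_singleton_eq_map, List.nil_append]
    rw [PySem.List.enumerate_eq_map_pyRange _ ""]
    simp only [List.map_map, PySem.List.len_eq, List.length_map,
      PySem.List.length_pyRange_one]
    have hlen : (((ntg - 0).toNat : Int) : Int) = ntg := by omega
    rw [hlen]
    apply List.map_congr_left
    intro i hi
    have hib := (PySem.List.mem_pyRange_one).mp hi
    simp only [Function.comp_apply]
    rw [PySem.List.pyGetD_map_pyRange_of_nonneg _ _ _ _ hib.1 hib.2]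
    simp [String.append_assoc]

theorem genetare_sp_tags_grp_all2all_changed : Claim_changed_genetare_sp_tags_grp_all2all := by
  unfold Claim_changed_genetare_sp_tags_grp_all2all; decide

theorem genetare_sp_tags_grp_all2all_tight : Claim_exact_genetare_sp_tags_grp_all2all := by
  intro ntg nch npg _hdom hpre hd heq
  obtain ⟨hpg, hmod, hg, hmt⟩ := hpre
  obtain ⟨hnch, hntg⟩ := hd
  have hpg' : 0 < npg := by rcases hpg with h | h <;> omega
  set g := PySem.Int.floordiv nch npg with hgdef
  have hgneg : g < 0 := by
    have h1 := PySem.Int.floordiv_mul_add_mod nch npg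
    rw [← hgdef, hmod] at h1
    nlinarith
  have hB : genetare_sp_tags_grp_all2all_alt ntg nch npg = [] := by
    simp only [genetare_sp_tags_grp_all2all_alt]
    rw [PySem.List.pyRange_one_eq_nil (show PySem.Int.floordiv nch npg ≤ 0 by omega)]
    simp
  have hA : (genetare_sp_tags_grp_all2all ntg nch npg).length = ntg.toNat := by
    simp only [genetare_sp_tags_grp_all2all]
    rw [PySem.List.foldl_append_singleton_eq_map, List.nil_append, List.length_map,
      PySem.List.length_pyRange_one]
    omega
  rw [heq, hB] at hA
  simp at hA
  omega
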